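-- pv_equiv track=rewrite | github.com/Rithvik985/Situated_Learning_Working | backend/routers/student.py | select_few_shot_examples
-- ===== SOURCE A (Python) =====
-- from typing import List, Optional, Dict, Any
-- from typing import List, Optional
--
-- FEW_SHOT_EXAMPLES = [
--     {
--         "domain": "Embedded Systems",
--         "topic": "Real-time Processing & Hardware Integration",
--         "example": """**Example 1 – Embedded Systems (Real-time Processing & Hardware Integration):**
--
-- Problem Statement:
-- Within your current professional environment, identify a project or system that involves real-time processing, hardware-software integration, or embedded control mechanisms. This could range from IoT device management, industrial automation systems, automotive control units, or telecommunications infrastructure that aligns with embedded systems concepts.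
--
-- Tasks:
-- 1. **System Analysis & Selection**: Document your chosen workplace system, analyzing its real-time requirements, hardware constraints, and current implementation approach
-- 2. **Architecture Design**: Propose an embedded solution using ARM SoC for high-level control and FPGA for hardware acceleration, incorporating your workplace-specific requirements
-- 3. **Implementation Planning**: Design the software architecture in C/C++, define communication protocols, and specify hardware interfaces (AXI, SPI, I2C) based on your system needs
-- 4. **Validation Strategy**: Develop testing procedures and simulation approaches to validate your proposed solution against workplace performance criteria
--
-- Deliverables:
-- - Technical analysis report of your selected workplace system
-- - Detailed design document with architecture diagrams and implementation specifications
-- - Prototype code samples and hardware configuration files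
-- - Testing plan and validation results demonstrating system performance"""
--     },
--     {
--         "domain": "Mechanical System Design",
--         "topic": "Optimization & Analysis",
--         "example": """**Example 2 – Mechanical System Design (Optimization & Analysis):**
--
-- Problem Statement:
-- In your current work environment, identify a mechanical system or component that could benefit from design optimization, performance analysis, or efficiency improvements. This might include HVAC systems, manufacturing equipment, automotive components, or industrial machinery that connects with mechanical design principles.
--
-- Tasks:
-- 1. **System Identification**: Select and document a relevant mechanical system from your workplace, outlining current performance metrics and optimization opportunities
-- 2. **Data Collection & Modeling**: Gather operational data (workplace data preferred, or reliable online sources with attribution) and develop mathematical models of system behavior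
-- 3. **Statistical Analysis**: Apply statistical methods to analyze performance variability, reliability patterns, and identify optimization parameters
-- 4. **Design Optimization**: Implement optimization techniques to enhance efficiency, reduce costs, or improve performance based on your workplace constraints
--
-- Deliverables:
-- - System analysis report with current state assessment and improvement opportunities
-- - Mathematical models and statistical analysis of system performance
-- - Optimization recommendations with supporting calculations and simulations
-- - Implementation plan adapted to your specific workplace context and constraints"""
--     },
--     {
--         "domain": "Software Development",
--         "topic": "Object-Oriented Systems & Database Integration",
--         "example": """**Example 3 – Software Development (Object-Oriented Systems & Database Integration):**
--
-- Problem Statement: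
-- Within your current professional role, identify a software system, application, or data management challenge that could benefit from object-oriented design principles and database optimization. This could involve enterprise applications, web services, mobile apps, or data processing systems currently used in your workplace.
--
-- Tasks:
-- 1. **Requirements Analysis**: Document a relevant software challenge from your work environment, analyzing current system limitations and identifying areas where OOP principles and database management could provide improvements
-- 2. **System Design**: Create an object-oriented architecture design that addresses your workplace requirements, incorporating appropriate design patterns, class hierarchies, and database schema optimization
-- 3. **Implementation**: Develop key components of your system using industry-standard programming languages and database management systems relevant to your workplace technology stack
-- 4. **Testing & Performance**: Implement comprehensive testing strategies and database performance optimization techniques, measuring improvements against your workplace success criteria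
--
-- Deliverables:
-- - Requirements document and current system analysis based on your workplace context
-- - Complete system design with UML diagrams, database schema, and architecture documentation
-- - Working code implementation with proper OOP structure and database integration
-- - Testing results and performance metrics demonstrating system improvements and workplace applicability"""
--     }
-- ]
--
-- def select_few_shot_examples(domains: List[str], topics: List[str]) -> List[Dict]:
--     """Select 3 most relevant few-shot examples based on domains and topics"""
--     # Simple matching logic - can be enhanced with semantic similarity
--     selected = []
--
--     # First, try to match by domain
--     for example in FEW_SHOT_EXAMPLES:
--         if any(domain.lower() in example["domain"].lower() for domain in domains):
--             selected.append(example)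
--             if len(selected) >= 3:
--                 break
--
--     # If we don't have 3 examples, add remaining ones
--     if len(selected) < 3:
--         for example in FEW_SHOT_EXAMPLES:
--             if example not in selected:
--                 selected.append(example)
--                 if len(selected) >= 3:
--                     break
--
--     return selected[:3]
-- ===== SOURCE B (Python) =====
-- from typing import List, Dict
--
-- FEW_SHOT_EXAMPLES = [
--     {
--         "domain": "Embedded Systems",
--         "topic": "Real-time Processing & Hardware Integration",
--         "example": """**Example 1 – Embedded Systems (Real-time Processing & Hardware Integration):**
--
-- Problem Statement:
-- Within your current professional environment, identify a project or system that involves real-time processing, hardware-software integration, or embedded control mechanisms. This could range from IoT device management, industrial automation systems, automotive control units, or telecommunications infrastructure that aligns with embedded systems concepts.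
--
-- Tasks:
-- 1. **System Analysis & Selection**: Document your chosen workplace system, analyzing its real-time requirements, hardware constraints, and current implementation approach
-- 2. **Architecture Design**: Propose an embedded solution using ARM SoC for high-level control and FPGA for hardware acceleration, incorporating your workplace-specific requirements
-- 3. **Implementation Planning**: Design the software architecture in C/C++, define communication protocols, and specify hardware interfaces (AXI, SPI, I2C) based on your system needs
-- 4. **Validation Strategy**: Develop testing procedures and simulation approaches to validate your proposed solution against workplace performance criteria
--
-- Deliverables:
-- - Technical analysis report of your selected workplace system
-- - Detailed design document with architecture diagrams and implementation specifications
-- - Prototype code samples and hardware configuration files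
-- - Testing plan and validation results demonstrating system performance"""
--     },
--     {
--         "domain": "Mechanical System Design",
--         "topic": "Optimization & Analysis",
--         "example": """**Example 2 – Mechanical System Design (Optimization & Analysis):**
--
-- Problem Statement:
-- In your current work environment, identify a mechanical system or component that could benefit from design optimization, performance analysis, or efficiency improvements. This might include HVAC systems, manufacturing equipment, automotive components, or industrial machinery that connects with mechanical design principles.
--
-- Tasks:
-- 1. **System Identification**: Select and document a relevant mechanical system from your workplace, outlining current performance metrics and optimization opportunities
-- 2. **Data Collection & Modeling**: Gather operational data (workplace data preferred, or reliable online sources with attribution) and develop mathematical models of system behavior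
-- 3. **Statistical Analysis**: Apply statistical methods to analyze performance variability, reliability patterns, and identify optimization parameters
-- 4. **Design Optimization**: Implement optimization techniques to enhance efficiency, reduce costs, or improve performance based on your workplace constraints
--
-- Deliverables:
-- - System analysis report with current state assessment and improvement opportunities
-- - Mathematical models and statistical analysis of system performance
-- - Optimization recommendations with supporting calculations and simulations
-- - Implementation plan adapted to your specific workplace context and constraints"""
--     },
--     {
--         "domain": "Software Development",
--         "topic": "Object-Oriented Systems & Database Integration",
--         "example": """**Example 3 – Software Development (Object-Oriented Systems & Database Integration):**
--
-- Problem Statement: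
-- Within your current professional role, identify a software system, application, or data management challenge that could benefit from object-oriented design principles and database optimization. This could involve enterprise applications, web services, mobile apps, or data processing systems currently used in your workplace.
--
-- Tasks:
-- 1. **Requirements Analysis**: Document a relevant software challenge from your work environment, analyzing current system limitations and identifying areas where OOP principles and database management could provide improvements
-- 2. **System Design**: Create an object-oriented architecture design that addresses your workplace requirements, incorporating appropriate design patterns, class hierarchies, and database schema optimization
-- 3. **Implementation**: Develop key components of your system using industry-standard programming languages and database management systems relevant to your workplace technology stack
-- 4. **Testing & Performance**: Implement comprehensive testing strategies and database performance optimization techniques, measuring improvements against your workplace success criteria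
--
-- Deliverables:
-- - Requirements document and current system analysis based on your workplace context
-- - Complete system design with UML diagrams, database schema, and architecture documentation
-- - Working code implementation with proper OOP structure and database integration
-- - Testing results and performance metrics demonstrating system improvements and workplace applicability"""
--     }
-- ]
--
--
-- def select_few_shot_examples(domains: List[str], topics: List[str]) -> List[Dict]:
--     """Select 3 most relevant few-shot examples: matched-by-domain first, then the rest."""
--     matched, unmatched = [], []
--     for example in FEW_SHOT_EXAMPLES:
--         if any(domain.lower() in example["domain"].lower() for domain in domains):
--             matched.append(example)
--         else:
--             unmatched.append(example)
--     return (matched + unmatched)[:3]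
-- ===== Notes on version B (the rewrite author's own statement) =====
-- stated objective: simpler
-- what changed: Replaced A's two sequential loops (match-pass, then a fill-pass with an 'example not in selected' membership scan) by a single classifying pass that partitions the examples into matched/unmatched in order, returning (matched + unmatched)[:3].
import Mathlib
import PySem

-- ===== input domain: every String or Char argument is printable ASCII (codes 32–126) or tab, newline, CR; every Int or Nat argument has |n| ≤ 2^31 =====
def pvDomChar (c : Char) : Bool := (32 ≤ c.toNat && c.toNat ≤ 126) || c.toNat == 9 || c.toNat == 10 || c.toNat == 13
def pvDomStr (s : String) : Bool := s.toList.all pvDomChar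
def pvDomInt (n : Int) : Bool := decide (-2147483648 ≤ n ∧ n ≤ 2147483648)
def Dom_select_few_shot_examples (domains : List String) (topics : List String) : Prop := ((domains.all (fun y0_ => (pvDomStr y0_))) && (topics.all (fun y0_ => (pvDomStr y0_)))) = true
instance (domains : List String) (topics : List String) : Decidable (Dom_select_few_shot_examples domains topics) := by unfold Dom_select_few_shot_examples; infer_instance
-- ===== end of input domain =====

-- B replaces A's two sequential loops (match pass + fill pass with a membership scan)
-- by one classifying pass (matched/unmatched) followed by (matched ++ unmatched).take 3; objective: simpler.
-- ===== PORT A =====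
def pvEx1 : List (String × String) := [("domain", "Embedded Systems"), ("topic", "Real-time Processing & Hardware Integration"), ("example", "**Example 1 – Embedded Systems (Real-time Processing & Hardware Integration):**\n\nProblem Statement:\nWithin your current professional environment, identify a project or system that involves real-time processing, hardware-software integration, or embedded control mechanisms. This could range from IoT device management, industrial automation systems, automotive control units, or telecommunications infrastructure that aligns with embedded systems concepts.\n\nTasks:\n1. **System Analysis & Selection**: Document your chosen workplace system, analyzing its real-time requirements, hardware constraints, and current implementation approach\n2. **Architecture Design**: Propose an embedded solution using ARM SoC for high-level control and FPGA for hardware acceleration, incorporating your workplace-specific requirements\n3. **Implementation Planning**: Design the software architecture in C/C++, define communication protocols, and specify hardware interfaces (AXI, SPI, I2C) based on your system needs\n4. **Validation Strategy**: Develop testing procedures and simulation approaches to validate your proposed solution against workplace performance criteria\n\nDeliverables:\n- Technical analysis report of your selected workplace system\n- Detailed design document with architecture diagrams and implementation specifications  \n- Prototype code samples and hardware configuration files\n- Testing plan and validation results demonstrating system performance")]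

def pvEx2 : List (String × String) := [("domain", "Mechanical System Design"), ("topic", "Optimization & Analysis"), ("example", "**Example 2 – Mechanical System Design (Optimization & Analysis):**\n\nProblem Statement:\nIn your current work environment, identify a mechanical system or component that could benefit from design optimization, performance analysis, or efficiency improvements. This might include HVAC systems, manufacturing equipment, automotive components, or industrial machinery that connects with mechanical design principles.\n\nTasks:\n1. **System Identification**: Select and document a relevant mechanical system from your workplace, outlining current performance metrics and optimization opportunities\n2. **Data Collection & Modeling**: Gather operational data (workplace data preferred, or reliable online sources with attribution) and develop mathematical models of system behavior\n3. **Statistical Analysis**: Apply statistical methods to analyze performance variability, reliability patterns, and identify optimization parameters\n4. **Design Optimization**: Implement optimization techniques to enhance efficiency, reduce costs, or improve performance based on your workplace constraints\n\nDeliverables:\n- System analysis report with current state assessment and improvement opportunities\n- Mathematical models and statistical analysis of system performance\n- Optimization recommendations with supporting calculations and simulations\n- Implementation plan adapted to your specific workplace context and constraints")]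

def pvEx3 : List (String × String) := [("domain", "Software Development"), ("topic", "Object-Oriented Systems & Database Integration"), ("example", "**Example 3 – Software Development (Object-Oriented Systems & Database Integration):**\n\nProblem Statement:\nWithin your current professional role, identify a software system, application, or data management challenge that could benefit from object-oriented design principles and database optimization. This could involve enterprise applications, web services, mobile apps, or data processing systems currently used in your workplace.\n\nTasks:\n1. **Requirements Analysis**: Document a relevant software challenge from your work environment, analyzing current system limitations and identifying areas where OOP principles and database management could provide improvements\n2. **System Design**: Create an object-oriented architecture design that addresses your workplace requirements, incorporating appropriate design patterns, class hierarchies, and database schema optimization\n3. **Implementation**: Develop key components of your system using industry-standard programming languages and database management systems relevant to your workplace technology stack\n4. **Testing & Performance**: Implement comprehensive testing strategies and database performance optimization techniques, measuring improvements against your workplace success criteria\n\nDeliverables:\n- Requirements document and current system analysis based on your workplace context\n- Complete system design with UML diagrams, database schema, and architecture documentation\n- Working code implementation with proper OOP structure and database integration\n- Testing results and performance metrics demonstrating system improvements and workplace applicability")]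


def pvFewShot : List (List (String × String)) := [pvEx1, pvEx2, pvEx3]

-- any(domain.lower() in example["domain"].lower() for domain in domains)
-- example["domain"] ported as Dict.getD with default "": every example in the fixed
-- FEW_SHOT_EXAMPLES literal has the key, so this is exact here.
def pvMatch (domains : List String) (ex : List (String × String)) : Bool :=
  domains.any (fun d =>
    PySem.Str.isIn (PySem.Str.lower d) (PySem.Str.lower (PySem.Dict.getD (PySem.Dict.mk ex) "domain" "")))

-- first loop of A: append matching examples, break at 3
def pvLoop1 (domains : List String) : List (List (String × String)) → List (List (String × String)) → List (List (String × String))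
  | [], sel => sel
  | e :: rest, sel =>
    if pvMatch domains e then
      let sel' := sel ++ [e]
      if 3 ≤ sel'.length then sel' else pvLoop1 domains rest sel'
    else pvLoop1 domains rest sel

-- second loop of A: fill with examples not already selected, break at 3
def pvLoop2 : List (List (String × String)) → List (List (String × String)) → List (List (String × String))
  | [], sel => sel
  | e :: rest, sel =>
    if sel.contains e then pvLoop2 rest sel
    else
      let sel' := sel ++ [e]
      if 3 ≤ sel'.length then sel' else pvLoop2 rest sel'

def select_few_shot_examples (domains : List String) (_topics : List String) : List (List (String × String)) :=
  let selected := pvLoop1 domains pvFewShot []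
  let selected := if selected.length < 3 then pvLoop2 pvFewShot selected else selected
  selected.take 3

-- ===== PORT B =====
def select_few_shot_examples_alt (domains : List String) (_topics : List String) : List (List (String × String)) :=
  let p := pvFewShot.foldl
    (fun (acc : List (List (String × String)) × List (List (String × String))) e =>
      if pvMatch domains e then (acc.1 ++ [e], acc.2) else (acc.1, acc.2 ++ [e]))
    ([], [])
  (p.1 ++ p.2).take 3

-- ===== PRECONDITION & SPEC =====
def Spec_select_few_shot_examples (domains : List String) (topics : List String) (out : List (List (String × String))) : Prop := out = select_few_shot_examples_alt domains topics
instance (domains : List String) (topics : List String) (out : List (List (String × String))) : Decidable (Spec_select_few_shot_examples domains topics out) := by unfold Spec_select_few_shot_examples; infer_instance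

-- ===== CLAIM (what is proved, stated in full; the proofs are below) =====
def Claim_equal_select_few_shot_examples : Prop := ∀ (domains : List String) (topics : List String), Dom_select_few_shot_examples domains topics → Spec_select_few_shot_examples domains topics (select_few_shot_examples domains topics)

-- ===== LEMMAS AND PROOFS =====
theorem pvNe12 : pvEx1 ≠ pvEx2 := by decide
theorem pvNe13 : pvEx1 ≠ pvEx3 := by decide
theorem pvNe23 : pvEx2 ≠ pvEx3 := by decide
theorem pvNe21 : pvEx2 ≠ pvEx1 := pvNe12.symm
theorem pvNe31 : pvEx3 ≠ pvEx1 := pvNe13.symm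
theorem pvNe32 : pvEx3 ≠ pvEx2 := pvNe23.symm


-- ===== VERDICT (by name: the statement is the Claim_ definition above) =====
theorem select_few_shot_examples_spec : Claim_equal_select_few_shot_examples := by
  intro domains topics _
  unfold Spec_select_few_shot_examples select_few_shot_examples select_few_shot_examples_alt pvFewShot
  by_cases h1 : pvMatch domains pvEx1 <;> by_cases h2 : pvMatch domains pvEx2 <;>
    by_cases h3 : pvMatch domains pvEx3 <;>
    simp only [pvLoop1, pvLoop2, h1, h2, h3, List.foldl, if_true, if_false, Bool.false_eq_true,
      List.length_append, List.length_cons, List.length_nil] <;>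
    simp [pvNe12, pvNe13, pvNe23, pvNe21, pvNe31, pvNe32]
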